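-- pv_equiv track=rewrite | github.com/abcxs/building_extraction | building/tif_process/utils.py | cut_into_
-- ===== SOURCE A (Python) =====
-- def cut_into_(width, height, size, overlap_size):
--     patch_list = []
--     for y in range(0, height, size - overlap_size):
--         for x in range(0, width, size - overlap_size):
--
--             patch_height = min(size, height - y)
--             patch_width = min(size, width - x)
--
--             if patch_width <= overlap_size and x > 0:
--                 continue
--             if patch_height <= overlap_size and y > 0:
--                 continue
--
--             start_y = y + patch_height - size
--             start_x = x + patch_width - size
--             patch_height = size
--             patch_width = size
--
--             if start_y < 0:
--                 start_y = 0
--                 patch_height = height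
--
--             if start_x < 0:
--                 start_x = 0
--                 patch_width = width
--
--             patch_list.append([start_x, start_y, patch_width, patch_height])
--     return patch_list
-- ===== SOURCE B (Python) =====
-- def cut_into_(width, height, size, overlap_size):
--     step = size - overlap_size
--
--     def axis_entries(extent):
--         # 1-D tiling: surviving (start, patch) pairs along one axis
--         entries = []
--         for c in range(0, extent, step):
--             p = min(size, extent - c)
--             if p <= overlap_size and c > 0:
--                 continue
--             s = c + p - size
--             if s < 0:
--                 entries.append((0, extent))
--             else:
--                 entries.append((s, size))
--         return entries
--
--     ys = axis_entries(height)
--     if not ys:           # no rows survive: skip the x pass entirely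
--         return []
--     xs = axis_entries(width)
--     return [[sx, sy, pw, ph] for (sy, ph) in ys for (sx, pw) in xs]
-- ===== Notes on version B (the rewrite author's own statement) =====
-- stated objective: alternative
-- what changed: A's nested 2-D scan recomputing the x-axis patches per row is replaced by two independent 1-D tiling passes (one per axis, each producing surviving (start, patch) pairs) combined afterwards by a y-outer/x-inner product comprehension.
import Mathlib
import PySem

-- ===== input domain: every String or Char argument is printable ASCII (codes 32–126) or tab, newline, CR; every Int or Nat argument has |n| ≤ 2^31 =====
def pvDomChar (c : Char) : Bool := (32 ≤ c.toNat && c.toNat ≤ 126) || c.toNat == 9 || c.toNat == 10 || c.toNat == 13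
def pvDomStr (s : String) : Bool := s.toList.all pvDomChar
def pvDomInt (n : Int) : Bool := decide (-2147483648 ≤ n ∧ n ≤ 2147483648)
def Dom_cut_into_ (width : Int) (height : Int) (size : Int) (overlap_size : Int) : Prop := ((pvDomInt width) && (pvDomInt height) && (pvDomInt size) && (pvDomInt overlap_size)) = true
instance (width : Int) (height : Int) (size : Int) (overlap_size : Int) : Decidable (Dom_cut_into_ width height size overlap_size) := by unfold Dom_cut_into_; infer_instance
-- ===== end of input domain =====

-- B replaces A's recomputing 2-D scan by two independent 1-D tiling passes (per-axis (start, patch) lists) combined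
-- by a product comprehension; same output, different decomposition (objective: alternative).

-- ===== PORT A =====
def cut_into_ (width : Int) (height : Int) (size : Int) (overlap_size : Int) : List (List Int) :=
  (PySem.List.pyRange 0 height (size - overlap_size)).foldl (fun patch_list y =>
    (PySem.List.pyRange 0 width (size - overlap_size)).foldl (fun pl x =>
      let patch_height := min size (height - y)
      let patch_width := min size (width - x)
      if patch_width ≤ overlap_size ∧ x > 0 then pl
      else if patch_height ≤ overlap_size ∧ y > 0 then pl
      else
        let start_y := y + patch_height - size
        let start_x := x + patch_width - size
        -- reassignment of start_/patch_ when the start underflows 0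
        let sy := if start_y < 0 then 0 else start_y
        let ph := if start_y < 0 then height else size
        let sx := if start_x < 0 then 0 else start_x
        let pw := if start_x < 0 then width else size
        pl ++ [[sx, sy, pw, ph]]) patch_list) []

-- ===== PORT B =====
-- helper of B: 1-D tiling along one axis (Source B's axis_entries)
def pvAxisEntries (extent : Int) (size : Int) (overlap_size : Int) : List (Int × Int) :=
  (PySem.List.pyRange 0 extent (size - overlap_size)).foldl (fun entries c =>
    let p := min size (extent - c)
    if p ≤ overlap_size ∧ c > 0 then entries
    else if c + p - size < 0 then entries ++ [(0, extent)]
    else entries ++ [(c + p - size, size)]) []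

def cut_into__alt (width : Int) (height : Int) (size : Int) (overlap_size : Int) : List (List Int) :=
  let ys := pvAxisEntries height size overlap_size
  if ys.isEmpty then []
  else
    let xs := pvAxisEntries width size overlap_size
    ys.flatMap (fun e => xs.map (fun f => [f.1, e.1, f.2, e.2]))

-- ===== PRECONDITION & SPEC =====
-- Pre_ excludes size = overlap_size, where Python's range step is 0 and A raises ValueError.
def Pre_cut_into_ (width : Int) (height : Int) (size : Int) (overlap_size : Int) : Prop :=
  size ≠ overlap_size
instance (width : Int) (height : Int) (size : Int) (overlap_size : Int) : Decidable (Pre_cut_into_ width height size overlap_size) := by unfold Pre_cut_into_; infer_instance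

def pvWitness_cut_into_ : Int × Int × Int × Int := (10, 7, 4, 1)

def Spec_cut_into_ (width : Int) (height : Int) (size : Int) (overlap_size : Int) (out : List (List Int)) : Prop := out = cut_into__alt width height size overlap_size
instance (width : Int) (height : Int) (size : Int) (overlap_size : Int) (out : List (List Int)) : Decidable (Spec_cut_into_ width height size overlap_size out) := by unfold Spec_cut_into_; infer_instance

-- ===== CLAIM (what is proved, stated in full; the proofs are below) =====
def Claim_equal_cut_into_ : Prop := ∀ (width : Int) (height : Int) (size : Int) (overlap_size : Int), Dom_cut_into_ width height size overlap_size → Pre_cut_into_ width height size overlap_size → Spec_cut_into_ width height size overlap_size (cut_into_ width height size overlap_size)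

-- ===== LEMMAS AND PROOFS =====

-- what A's inner-loop body appends for one (y, x) (empty on a `continue`)
def gA (w h s o y x : Int) : List (List Int) :=
  if min s (w - x) ≤ o ∧ x > 0 then []
  else if min s (h - y) ≤ o ∧ y > 0 then []
  else [[if x + min s (w - x) - s < 0 then 0 else x + min s (w - x) - s,
         if y + min s (h - y) - s < 0 then 0 else y + min s (h - y) - s,
         if x + min s (w - x) - s < 0 then w else s,
         if y + min s (h - y) - s < 0 then h else s]]

-- what B's axis loop appends for one coordinate
def gW (extent s o c : Int) : List (Int × Int) :=
  if min s (extent - c) ≤ o ∧ c > 0 then []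
  else if c + min s (extent - c) - s < 0 then [(0, extent)]
  else [(c + min s (extent - c) - s, s)]

lemma axis_flat (extent s o : Int) :
    pvAxisEntries extent s o = (PySem.List.pyRange 0 extent (s - o)).flatMap (gW extent s o) := by
  unfold pvAxisEntries
  have hfun : (fun (entries : List (Int × Int)) c =>
      let p := min s (extent - c)
      if p ≤ o ∧ c > 0 then entries
      else if c + p - s < 0 then entries ++ [(0, extent)]
      else entries ++ [(c + p - s, s)]) = fun entries c => entries ++ gW extent s o c := by
    funext entries c
    simp only [gW]
    split_ifs <;> simp
  rw [hfun, PySem.List.foldl_append_eq_flatMap]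
  simp

lemma A_flat (w h s o : Int) :
    cut_into_ w h s o = (PySem.List.pyRange 0 h (s - o)).flatMap (fun y =>
      (PySem.List.pyRange 0 w (s - o)).flatMap (gA w h s o y)) := by
  unfold cut_into_
  have hin : (fun (patch_list : List (List Int)) y =>
      (PySem.List.pyRange 0 w (s - o)).foldl (fun pl x =>
        let patch_height := min s (h - y)
        let patch_width := min s (w - x)
        if patch_width ≤ o ∧ x > 0 then pl
        else if patch_height ≤ o ∧ y > 0 then pl
        else
          let start_y := y + patch_height - s
          let start_x := x + patch_width - s
          let sy := if start_y < 0 then 0 else start_y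
          let ph := if start_y < 0 then h else s
          let sx := if start_x < 0 then 0 else start_x
          let pw := if start_x < 0 then w else s
          pl ++ [[sx, sy, pw, ph]]) patch_list) =
      fun patch_list y => patch_list ++ (PySem.List.pyRange 0 w (s - o)).flatMap (gA w h s o y) := by
    funext patch_list y
    have hbody : (fun (pl : List (List Int)) x =>
        let patch_height := min s (h - y)
        let patch_width := min s (w - x)
        if patch_width ≤ o ∧ x > 0 then pl
        else if patch_height ≤ o ∧ y > 0 then pl
        else
          let start_y := y + patch_height - s
          let start_x := x + patch_width - s
          let sy := if start_y < 0 then 0 else start_y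
          let ph := if start_y < 0 then h else s
          let sx := if start_x < 0 then 0 else start_x
          let pw := if start_x < 0 then w else s
          pl ++ [[sx, sy, pw, ph]]) = fun pl x => pl ++ gA w h s o y x := by
      funext pl x
      simp only [gA]
      split_ifs <;> simp
    rw [hbody, PySem.List.foldl_append_eq_flatMap]
  rw [hin, PySem.List.foldl_append_eq_flatMap]
  simp

lemma inner_eq (w h s o y : Int) :
    (PySem.List.pyRange 0 w (s - o)).flatMap (gA w h s o y) =
      (gW h s o y).flatMap (fun e =>
        ((PySem.List.pyRange 0 w (s - o)).flatMap (gW w s o)).map (fun f => [f.1, e.1, f.2, e.2])) := by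
  by_cases hy : min s (h - y) ≤ o ∧ y > 0
  · have hA : ∀ x, gA w h s o y x = [] := by
      intro x; simp only [gA]; split_ifs <;> simp_all
    have : (PySem.List.pyRange 0 w (s - o)).flatMap (gA w h s o y) = (PySem.List.pyRange 0 w (s - o)).flatMap (fun _ => ([] : List (List Int))) :=
      List.flatMap_congr (fun x _ => hA x)
    simp [gW, hy, this]
  · have hgW : gW h s o y =
        [(if y + min s (h - y) - s < 0 then 0 else y + min s (h - y) - s,
          if y + min s (h - y) - s < 0 then h else s)] := by
      simp only [gW]
      split_ifs <;> simp_all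
    rw [hgW]
    simp only [List.flatMap_cons, List.flatMap_nil, List.append_nil, List.map_flatMap]
    apply List.flatMap_congr
    intro x _
    simp only [gA, gW]
    split_ifs <;> simp_all
  
lemma main_eq (w h s o : Int) : cut_into_ w h s o = cut_into__alt w h s o := by
  rw [A_flat]
  unfold cut_into__alt
  by_cases hys : (pvAxisEntries h s o).isEmpty
  · rw [List.isEmpty_iff] at hys
    simp only [axis_flat] at hys ⊢
    rw [hys]
    have hA : ∀ y ∈ PySem.List.pyRange 0 h (s - o),
        (PySem.List.pyRange 0 w (s - o)).flatMap (gA w h s o y) = ([] : List (List Int)) := by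
      intro y hy
      rw [inner_eq, List.flatMap_eq_nil_iff.mp hys y hy]
      rfl
    rw [List.flatMap_congr hA]
    simp
  · simp only [hys, if_neg, Bool.false_eq_true, not_false_eq_true, if_false]
    rw [axis_flat, axis_flat, List.flatMap_assoc]
    apply List.flatMap_congr
    intro y _
    exact inner_eq w h s o y

-- ===== VERDICT (by name: the statement is the Claim_ definition above) =====
theorem cut_into__spec : Claim_equal_cut_into_ := by
  intro w h s o _ _
  unfold Spec_cut_into_
  exact main_eq w h s o
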